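-- pv_equiv track=rewrite | github.com/be-simon/algorithm | programmers/greedy#2.py | solution
-- ===== SOURCE A (Python) =====
-- def solution(name):
--     no_a = []
--     answer = 0
--     for i in range(len(name)):
--         if name[i] != 'A':
--             no_a.append(i)
--             move = ord(name[i]) - ord('A') if name[i]  < 'N' else ord('A') + 26 - ord(name[i])
--             answer += move
--
--     if len(no_a) == len(name):
--         return answer + len(name) - 1
--
--     c = 0
--     d = 0
--     while len(no_a) > 0:
--
--         if d == 0:
--           f = no_a[0] - c
--           b = len(name) - no_a[-1] + c
--         else:
--           f = c - no_a[-1]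
--           b = len(name) - c + no_a[0]
--
--         if f <= b:
--             answer += f
--
--         else:
--             answer += b
--             d = (-1 if d == 0 else 0)
--
--         c = no_a[d]
--         no_a.pop(d)
--     return answer
-- ===== SOURCE B (Python) =====
-- def solution(name):
--     n = len(name)
--     no_a = [i for i, ch in enumerate(name) if ch != 'A']
--     answer = sum(ord(ch) - ord('A') if ch < 'N' else ord('A') + 26 - ord(ch)
--                  for ch in name if ch != 'A')
--     if len(no_a) == n:
--         return answer + n - 1
--     lo, hi = 0, len(no_a) - 1
--     c, d = 0, 0
--     while lo <= hi:
--         if d == 0: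
--             f = no_a[lo] - c
--             b = n - no_a[hi] + c
--         else:
--             f = c - no_a[hi]
--             b = n - c + no_a[lo]
--         if f <= b:
--             answer += f
--         else:
--             answer += b
--             d = -1 if d == 0 else 0
--         if d == 0:
--             c = no_a[lo]
--             lo += 1
--         else:
--             c = no_a[hi]
--             hi -= 1
--     return answer
-- ===== Notes on version B (the rewrite author's own statement) =====
-- stated objective: alternative
-- what changed: A's while loop destructively pops the remaining-targets list from the front or back (pop(0) shifts the list); B keeps the list fixed and walks two index pointers lo/hi over it, and builds the index list and vertical cost by comprehensions instead of one appending loop.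
import Mathlib
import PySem

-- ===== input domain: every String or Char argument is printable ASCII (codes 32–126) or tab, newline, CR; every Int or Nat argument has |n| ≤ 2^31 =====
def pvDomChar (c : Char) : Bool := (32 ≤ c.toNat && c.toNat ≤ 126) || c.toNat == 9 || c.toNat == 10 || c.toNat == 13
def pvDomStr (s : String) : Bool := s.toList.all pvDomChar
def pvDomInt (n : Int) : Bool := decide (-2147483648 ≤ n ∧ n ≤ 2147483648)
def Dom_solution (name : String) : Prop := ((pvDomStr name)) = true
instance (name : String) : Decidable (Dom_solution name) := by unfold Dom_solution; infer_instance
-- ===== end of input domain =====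

-- B replaces A's destructive pop(0)/pop(-1) on the remaining-targets list by two
-- index pointers into an immutable list (objective: alternative).

-- ===== PORT A =====

-- vertical cost of one character (shared inline expression of A)
def moveA (ch : Char) : Int :=
  if ch < 'N' then (ch.toNat : Int) - 65 else 65 + 26 - (ch.toNat : Int)

-- the while loop of A: no_a shrinks by a pop at the front (d = 0) or back (d = -1)
def loopA (n : Int) (l : List Int) (c d ans : Int) : Int :=
  if h : l = [] then ans
  else
    let f := if d = 0 then l.head h - c else c - l.getLast h
    let b := if d = 0 then n - l.getLast h + c else n - c + l.head h
    if f ≤ b then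
      if d = 0 then loopA n l.tail (l.head h) d (ans + f)
      else loopA n l.dropLast (l.getLast h) d (ans + f)
    else
      if d = 0 then loopA n l.dropLast (l.getLast h) (-1) (ans + b)
      else loopA n l.tail (l.head h) 0 (ans + b)
termination_by l.length
decreasing_by
  · simp [List.length_tail]; cases l with | nil => exact absurd rfl h | cons a t => simp
  · rw [List.length_dropLast]; cases l with | nil => exact absurd rfl h | cons a t => simp
  · rw [List.length_dropLast]; cases l with | nil => exact absurd rfl h | cons a t => simp
  · simp [List.length_tail]; cases l with | nil => exact absurd rfl h | cons a t => simp

def solution (name : String) : Int :=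
  let cs := name.toList
  -- 'for i in range(len(name)): name[i]' traverses the characters with their indices
  let st := (PySem.List.enumerate cs).foldl
      (fun (st : List Int × Int) p =>
        if p.2 ≠ 'A' then (st.1 ++ [p.1], st.2 + moveA p.2) else st)
      ([], 0)
  if (st.1.length : Int) = (cs.length : Int) then st.2 + (cs.length : Int) - 1
  else loopA (cs.length : Int) st.1 0 0 st.2

-- ===== PORT B =====

-- B's while loop: lo/hi pointers into the fixed list no_a.
-- Invariant 0 ≤ lo ≤ hi < arr.length holds at every recursive call, where
-- 'arr.getD lo.toNat 0' is exactly Python's in-range 'no_a[lo]'.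
def loopB (n : Int) (arr : List Int) (lo hi c d ans : Int) : Int :=
  if hle : lo ≤ hi then
    let f := if d = 0 then arr.getD lo.toNat 0 - c else c - arr.getD hi.toNat 0
    let b := if d = 0 then n - arr.getD hi.toNat 0 + c else n - c + arr.getD lo.toNat 0
    let ans' := if f ≤ b then ans + f else ans + b
    let d' := if f ≤ b then d else if d = 0 then -1 else 0
    if d' = 0 then loopB n arr (lo + 1) hi (arr.getD lo.toNat 0) d' ans'
    else loopB n arr lo (hi - 1) (arr.getD hi.toNat 0) d' ans'
  else ans
termination_by (hi + 1 - lo).toNat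
decreasing_by all_goals omega

def solution_alt (name : String) : Int :=
  let cs := name.toList
  let n : Int := cs.length
  let no_a : List Int := (PySem.List.enumerate cs).filterMap
      (fun p => if p.2 ≠ 'A' then some p.1 else none)
  -- B inlines the per-character cost expression in its sum comprehension
  let answer : Int := ((cs.filter (fun ch => ch ≠ 'A')).map
      (fun ch => if ch < 'N' then (ch.toNat : Int) - 65 else 65 + 26 - (ch.toNat : Int))).sum
  if (no_a.length : Int) = n then answer + n - 1
  else loopB n no_a 0 ((no_a.length : Int) - 1) 0 0 answer

-- ===== PRECONDITION & SPEC =====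
def Spec_solution (name : String) (out : Int) : Prop := out = solution_alt name
instance (name : String) (out : Int) : Decidable (Spec_solution name out) := by unfold Spec_solution; infer_instance

-- ===== CLAIM (what is proved, stated in full; the proofs are below) =====
def Claim_equal_solution : Prop := ∀ (name : String), Dom_solution name → Spec_solution name (solution name)

-- ===== LEMMAS AND PROOFS =====

-- A's single building loop computes (B's filterMap, B's sum), for any accumulator.
theorem build_eq (L : List (Int × Char)) (acc : List Int) (s : Int) :
    L.foldl (fun (st : List Int × Int) p =>
        if p.2 ≠ 'A' then (st.1 ++ [p.1], st.2 + moveA p.2) else st) (acc, s)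
      = (acc ++ L.filterMap (fun p => if p.2 ≠ 'A' then some p.1 else none),
         s + (((L.map Prod.snd).filter (fun ch => ch ≠ 'A')).map
           (fun ch => if ch < 'N' then (ch.toNat : Int) - 65 else 65 + 26 - (ch.toNat : Int))).sum) := by
  induction L generalizing acc s with
  | nil => simp
  | cons p t ih =>
    have hm : moveA p.2 =
        (if p.2 < 'N' then (p.2.toNat : Int) - 65 else 65 + 26 - (p.2.toNat : Int)) := rfl
    simp only [List.foldl_cons]
    by_cases hp : p.2 = 'A'
    · rw [if_neg (by simp [hp]), ih]; simp [hp]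
    · rw [if_pos hp, ih]; simp [hp, hm, add_assoc]

-- the sublist of arr between the two pointers, inclusive
def seg (arr : List Int) (lo hi : Nat) : List Int := (arr.drop lo).take (hi + 1 - lo)

theorem seg_head (arr : List Int) (lo hi : Nat) (hle : lo ≤ hi) (hhi : hi < arr.length)
    (h : seg arr lo hi ≠ []) : (seg arr lo hi).head h = arr.getD lo 0 := by
  rw [List.head_eq_getElem, List.getD_eq_getElem arr 0 (by omega)]
  simp [seg]

theorem seg_len (arr : List Int) (lo hi : Nat) (hle : lo ≤ hi) (hhi : hi < arr.length) :
    (seg arr lo hi).length = hi + 1 - lo := by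
  simp [seg]; omega

theorem seg_ne (arr : List Int) (lo hi : Nat) (hle : lo ≤ hi) (hhi : hi < arr.length) :
    seg arr lo hi ≠ [] := by
  have := seg_len arr lo hi hle hhi
  intro h; rw [h] at this; simp at this; omega

theorem seg_last (arr : List Int) (lo hi : Nat) (hle : lo ≤ hi) (hhi : hi < arr.length)
    (h : seg arr lo hi ≠ []) : (seg arr lo hi).getLast h = arr.getD hi 0 := by
  rw [List.getLast_eq_getElem, List.getD_eq_getElem arr 0 (by omega)]
  have hl := seg_len arr lo hi hle hhi
  simp only [seg] at *
  rw [List.getElem_take, List.getElem_drop]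
  congr 1; omega

theorem seg_tail (arr : List Int) (lo hi : Nat) :
    (seg arr lo hi).tail = seg arr (lo + 1) hi := by
  simp only [seg, ← List.drop_one, List.drop_take, List.drop_drop]
  have h2 : hi + 1 - lo - 1 = hi + 1 - (lo + 1) := by omega
  rw [h2]
  try rw [show 1 + lo = lo + 1 from by omega]

theorem seg_dropLast (arr : List Int) (lo hi : Nat) (hle : lo ≤ hi) (hhi : hi < arr.length) (hpos : 0 < hi) :
    (seg arr lo hi).dropLast = seg arr lo (hi - 1) := by
  rw [List.dropLast_eq_take, seg_len arr lo hi hle hhi]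
  simp only [seg, List.take_take]
  congr 1 <;> omega

-- loopB on pointers equals loopA on the corresponding sublist.
theorem loopB_eq_loopA (n : Int) (arr : List Int) (k lo hi : Nat) (c d ans : Int)
    (hk : hi + 1 - lo ≤ k) (hhi : hi < arr.length) :
    loopB n arr (lo : Int) (hi : Int) c d ans = loopA n (seg arr lo hi) c d ans := by
  induction k generalizing lo hi c d ans with
  | zero =>
    have h0 : hi + 1 - lo = 0 := by omega
    rw [loopB, loopA]
    rw [dif_neg (by push_cast; omega), dif_pos (by simp [seg, h0])]
  | succ k ih =>
    by_cases hle : lo ≤ hi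
    · have hne := seg_ne arr lo hi hle hhi
      rw [loopB, loopA]
      rw [dif_pos (by push_cast; omega), dif_neg hne]
      simp only [seg_head arr lo hi hle hhi hne, seg_last arr lo hi hle hhi hne,
        Int.toNat_natCast]
      by_cases hd : d = 0 <;> simp only [hd, if_pos rfl, reduceIte] <;>
        [by_cases hfb : arr.getD lo 0 - c ≤ n - arr.getD hi 0 + c;
         by_cases hfb : c - arr.getD hi 0 ≤ n - c + arr.getD lo 0] <;>
        simp only [hfb, if_pos, if_neg, ite_true, ite_false, reduceIte]
      · -- d = 0, forward: lo+1
        rw [show ((lo : Int) + 1) = ((lo + 1 : Nat) : Int) by push_cast; ring,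
          ih (lo+1) hi _ _ _ (by omega) hhi, seg_tail]
      · -- d = 0, flip to -1: hi-1
        rcases Nat.eq_zero_or_pos hi with h0 | hpos
        · subst h0
          have hlo : lo = 0 := by omega
          subst hlo
          have hempty : (seg arr 0 0).dropLast = [] := by
            rw [List.dropLast_eq_take, seg_len arr 0 0 hle hhi]; simp
          rw [if_neg (by decide), loopB, dif_neg (by omega), hempty,
            loopA, dif_pos rfl]
        · rw [if_neg (by decide),
            show ((hi : Int) - 1) = ((hi - 1 : Nat) : Int) by push_cast [hpos]; ring,
            ih lo (hi-1) _ _ _ (by omega) (by omega), seg_dropLast arr lo hi hle hhi hpos]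
      · -- d = -1 (≠ 0), backward: hi-1
        rcases Nat.eq_zero_or_pos hi with h0 | hpos
        · subst h0
          have hlo : lo = 0 := by omega
          subst hlo
          have hempty : (seg arr 0 0).dropLast = [] := by
            rw [List.dropLast_eq_take, seg_len arr 0 0 hle hhi]; simp
          rw [if_neg hd, loopB, dif_neg (by omega), hempty, loopA, dif_pos rfl]
        · rw [if_neg hd,
            show ((hi : Int) - 1) = ((hi - 1 : Nat) : Int) by push_cast [hpos]; ring,
            ih lo (hi-1) _ _ _ (by omega) (by omega), seg_dropLast arr lo hi hle hhi hpos]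
      · -- d ≠ 0, flip to 0: lo+1
        rw [show ((lo : Int) + 1) = ((lo + 1 : Nat) : Int) by push_cast; ring,
          ih (lo+1) hi _ _ _ (by omega) hhi, seg_tail]
    · have h0 : hi + 1 - lo = 0 := by omega
      rw [loopB, loopA]
      rw [dif_neg (by push_cast; omega), dif_pos (by simp [seg, h0])]

theorem map_snd_enumerate (xs : List Char) (s : Int) :
    (PySem.List.enumerate xs s).map Prod.snd = xs := by
  induction xs generalizing s with
  | nil => simp [PySem.List.enumerate_nil]
  | cons x t ih => simp [PySem.List.enumerate_cons, ih]

-- ===== VERDICT (by name: the statement is the Claim_ definition above) =====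
theorem solution_spec : Claim_equal_solution := by
  intro name _
  unfold Spec_solution solution solution_alt
  simp only [build_eq (PySem.List.enumerate name.toList) [] 0, map_snd_enumerate,
    List.nil_append, zero_add]
  set no_a : List Int := (PySem.List.enumerate name.toList).filterMap
    (fun p => if p.2 ≠ 'A' then some p.1 else none) with hna
  set ans : Int := ((name.toList.filter (fun ch => ch ≠ 'A')).map
      (fun ch => if ch < 'N' then (ch.toNat : Int) - 65 else 65 + 26 - (ch.toNat : Int))).sum with hans
  by_cases hlen : (no_a.length : Int) = (name.toList.length : Int)
  · simp [hlen]
  · simp only [hlen, if_neg, ite_false]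
    by_cases hnil : no_a = []
    · rw [hnil, loopA, dif_pos rfl, loopB, dif_neg (by simp)]
    · have hpos : 0 < no_a.length := List.length_pos_iff.mpr hnil
      have h := loopB_eq_loopA (name.toList.length : Int) no_a no_a.length 0
        (no_a.length - 1) 0 0 ans (by omega) (by omega)
      have hseg : seg no_a 0 (no_a.length - 1) = no_a := by
        simp only [seg, List.drop_zero, Nat.sub_zero]
        rw [show no_a.length - 1 + 1 = no_a.length from by omega, List.take_length]
      rw [hseg, Nat.cast_sub (by omega), Nat.cast_zero, Nat.cast_one] at h
      exact h.symm
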